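-- pv_equiv track=rewrite | github.com/alexwhite1/fpgen | para.py | wordlen
-- ===== SOURCE A (Python) =====
-- def wordlen(w):
--   i = 0
--   n = len(w)
--   while i < n:
--     c = w[i]
--     if c.isalnum():
--       break
--     i += 1
--   j = i
--   while i < n:
--     c = w[i]
--     if not c.isalnum():
--       break
--     i += 1
--   return i - j
-- ===== SOURCE B (Python) =====
-- def wordlen(w):
--   # Transform-and-tokenize: blank out every non-alphanumeric character,
--   # tokenize with str.split(), and measure the first token (0 if none).
--   tokens = ''.join(c if c.isalnum() else ' ' for c in w).split()
--   return len(tokens[0]) if tokens else 0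
-- ===== Notes on version B (the rewrite author's own statement) =====
-- stated objective: alternative
-- what changed: Replaces A's two index-advancing while loops (skip non-alnum, then count the run) with a transform-and-tokenize pipeline: map every non-alphanumeric character to a space, split on whitespace, and return the length of the first token (0 if none).
import Mathlib
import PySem

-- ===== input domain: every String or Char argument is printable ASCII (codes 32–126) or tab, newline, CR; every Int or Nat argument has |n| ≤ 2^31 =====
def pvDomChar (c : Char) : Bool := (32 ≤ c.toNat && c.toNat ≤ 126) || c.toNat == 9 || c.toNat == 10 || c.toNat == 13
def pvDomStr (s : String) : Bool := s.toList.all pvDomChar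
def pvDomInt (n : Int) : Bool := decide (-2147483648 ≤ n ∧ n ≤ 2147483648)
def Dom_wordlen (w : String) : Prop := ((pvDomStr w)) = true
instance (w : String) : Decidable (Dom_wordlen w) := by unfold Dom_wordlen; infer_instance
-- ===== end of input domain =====

-- B replaces A's two index-advancing while loops with a transform-and-tokenize
-- pipeline (blank out non-alphanumerics, str.split(), length of first token);
-- objective: alternative (same cost, different algorithmic decomposition).

-- ===== PORT A =====
-- first while loop: advance i past non-alphanumeric characters
def wordlenSkip : List Char → Nat → Nat
  | [], i => i
  | c :: rest, i => if PySem.Chars.isalnum c then i else wordlenSkip rest (i + 1)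

-- second while loop: advance i across alphanumeric characters
def wordlenRun : List Char → Nat → Nat
  | [], i => i
  | c :: rest, i => if ¬ PySem.Chars.isalnum c then i else wordlenRun rest (i + 1)

def wordlen (w : String) : Int :=
  let cs := w.toList
  let i := wordlenSkip cs 0
  let j := i
  let i' := wordlenRun (cs.drop i) i
  (i' : Int) - (j : Int)

-- ===== PORT B =====
-- ''.join(c if c.isalnum() else ' ' for c in w): join with empty separator of
-- single characters = the string of the mapped characters (String.ofList).
def wordlen_alt (w : String) : Int :=
  let tokens := PySem.Str.split₀ (String.ofList (w.toList.map (fun c => if PySem.Chars.isalnum c then c else ' ')))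
  match tokens with
  | [] => 0
  | t :: _ => PySem.Str.len t

-- ===== PRECONDITION & SPEC =====
def Spec_wordlen (w : String) (out : Int) : Prop := out = wordlen_alt w
instance (w : String) (out : Int) : Decidable (Spec_wordlen w out) := by unfold Spec_wordlen; infer_instance

-- ===== CLAIM (what is proved, stated in full; the proofs are below) =====
def Claim_equal_wordlen : Prop := ∀ (w : String), Dom_wordlen w → Spec_wordlen w (wordlen w)

-- ===== LEMMAS AND PROOFS =====

-- the character mapping of B
def blankNonAlnum (c : Char) : Char := if PySem.Chars.isalnum c then c else ' '

-- length of the leading alphanumeric run (proof-only helper)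
def runLen : List Char → Int
  | [] => 0
  | c :: rest => if PySem.Chars.isalnum c then 1 + runLen rest else 0

-- length of the first token of a token list (proof-only helper)
def firstLen : List (List Char) → Int
  | [] => 0
  | t :: _ => (t.length : Int)

theorem space_isspace : PySem.Chars.isspace ' ' = true := by decide

theorem alnum_not_space (c : Char) (h : PySem.Chars.isalnum c = true) :
    PySem.Chars.isspace c = false := by
  simp only [PySem.Chars.isalnum, PySem.Chars.isalpha, PySem.Chars.isdigit, PySem.Chars.isupper,
    PySem.Chars.islower, Bool.or_eq_true, Bool.and_eq_true, decide_eq_true_eq, Char.le_def,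
    UInt32.le_iff_toNat_le, Char.toNat_val, Char.reduceToNat] at h
  simp only [PySem.Chars.isspace, Bool.or_eq_false_iff, Bool.and_eq_false_iff,
    decide_eq_false_iff_not, not_le]
  omega

-- once the accumulator is nonempty, the first token of the final result is its bottom element
theorem go_first_of_acc : ∀ (m cur : List Char) (l : List (List Char)) (a : List Char),
    firstLen (PySem.Chars.split₀.go m cur (l ++ [a])) = (a.length : Int) := by
  intro m
  induction m with
  | nil =>
    intro cur l a
    by_cases h : cur.isEmpty
    · simp [PySem.Chars.split₀.go, h, firstLen]
    · simp [PySem.Chars.split₀.go, h, firstLen]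
  | cons c rest ih =>
    intro cur l a
    by_cases hs : PySem.Chars.isspace c
    · by_cases h : cur.isEmpty
      · simp [PySem.Chars.split₀.go, hs, h, ih]
      · rw [show PySem.Chars.split₀.go (c :: rest) cur (l ++ [a])
              = PySem.Chars.split₀.go rest [] ((cur.reverse :: l) ++ [a]) by
            simp [PySem.Chars.split₀.go, hs, h]]
        exact ih [] (cur.reverse :: l) a
    · simp [PySem.Chars.split₀.go, hs, ih]

-- counting phase: a nonempty current word plus the leading alnum run of the rest
theorem go_count : ∀ (cs cur : List Char), cur ≠ [] →
    firstLen (PySem.Chars.split₀.go (cs.map blankNonAlnum) cur []) = (cur.length : Int) + runLen cs := by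
  intro cs
  induction cs with
  | nil =>
    intro cur hc
    simp [PySem.Chars.split₀.go, List.isEmpty_iff, hc, firstLen, runLen]
  | cons c rest ih =>
    intro cur hc
    by_cases h : PySem.Chars.isalnum c
    · have := ih (c :: cur) (by simp)
      simp [blankNonAlnum, PySem.Chars.split₀.go, h, alnum_not_space c h, runLen, this]
      ring
    · have := go_first_of_acc (rest.map blankNonAlnum) [] [] cur.reverse
      simp only [List.nil_append] at this
      simp [blankNonAlnum, PySem.Chars.split₀.go, h, space_isspace, List.isEmpty_iff, hc, runLen, this]


theorem wordlenSkip_shift : ∀ (cs : List Char) (i : Nat), wordlenSkip cs (i + 1) = wordlenSkip cs i + 1 := by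
  intro cs
  induction cs with
  | nil => intro i; simp [wordlenSkip]
  | cons c rest ih =>
    intro i
    by_cases h : PySem.Chars.isalnum c
    · simp [wordlenSkip, h]
    · simp [wordlenSkip, h, ih]

-- skipping phase: first token length = leading alnum run after the skip
theorem go_main : ∀ (cs : List Char),
    firstLen (PySem.Chars.split₀.go (cs.map blankNonAlnum) [] []) = runLen (cs.drop (wordlenSkip cs 0)) := by
  intro cs
  induction cs with
  | nil => simp [PySem.Chars.split₀.go, firstLen, runLen, wordlenSkip]
  | cons c rest ih =>
    by_cases h : PySem.Chars.isalnum c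
    · have := go_count rest [c] (by simp)
      simp [blankNonAlnum, PySem.Chars.split₀.go, h, alnum_not_space c h, wordlenSkip, runLen, this]
    · simp [blankNonAlnum, PySem.Chars.split₀.go, h, space_isspace, wordlenSkip, wordlenSkip_shift, ih]

-- A's second loop computes i + runLen
theorem wordlenRun_eq : ∀ (cs : List Char) (i : Nat), (wordlenRun cs i : Int) = i + runLen cs := by
  intro cs
  induction cs with
  | nil => intro i; simp [wordlenRun, runLen]
  | cons c rest ih =>
    intro i
    by_cases h : PySem.Chars.isalnum c
    · simp [wordlenRun, runLen, h, ih (i + 1)]; ring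
    · simp [wordlenRun, runLen, h]

-- B's result is firstLen of the tokenization
theorem alt_eq_firstLen (w : String) :
    wordlen_alt w = firstLen (PySem.Chars.split₀ (w.toList.map blankNonAlnum)) := by
  unfold wordlen_alt
  rw [show (fun c => if PySem.Chars.isalnum c then c else ' ') = blankNonAlnum from rfl]
  simp only [PySem.Str.split₀]
  cases h : PySem.Chars.split₀ ((String.ofList (w.toList.map blankNonAlnum)).toList) with
  | nil => simp_all [firstLen]
  | cons t ts => simp_all [firstLen, PySem.Str.len]

-- ===== VERDICT (by name: the statement is the Claim_ definition above) =====
theorem wordlen_spec : Claim_equal_wordlen := by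
  intro w _
  unfold Spec_wordlen wordlen
  simp only []
  rw [wordlenRun_eq]
  rw [alt_eq_firstLen w]
  unfold PySem.Chars.split₀
  rw [go_main w.toList]
  ring
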